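-- pv_equiv track=rewrite | github.com/drakegriffith/cs1301 | hw/HW04/HW04SOL.py | messageDecoder
-- ===== SOURCE A (Python) =====
-- def messageDecoder(message):
--     newmessage = str(message)[::-1]
--     decodedMessage = ''
--     count = 0
--     for c in newmessage :
--         if c.isalpha() :
--             decodedMessage += str(c)
--             count += 1
--             continue
--         if c == " " :
--             decodedMessage += " "
--             continue
--         if count == 0 :
--             return 'No message'
--     return decodedMessage
-- ===== SOURCE B (Python) =====
-- def messageDecoder(message):
--     rev = str(message)[::-1]
--     seen_letter = False
--     for c in rev:
--         if c.isalpha():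
--             seen_letter = True
--         elif c != ' ' and not seen_letter:
--             return 'No message'
--     return ''.join(c for c in rev if c.isalpha() or c == ' ')
-- ===== Notes on version B (the rewrite author's own statement) =====
-- stated objective: simpler
-- what changed: Replaces A's single fused stateful loop (building the output while counting letters and bailing mid-build) with two separate passes over the reversed string: a validity scan with a boolean flag, then a plain filtering join for the output.
import Mathlib
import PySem

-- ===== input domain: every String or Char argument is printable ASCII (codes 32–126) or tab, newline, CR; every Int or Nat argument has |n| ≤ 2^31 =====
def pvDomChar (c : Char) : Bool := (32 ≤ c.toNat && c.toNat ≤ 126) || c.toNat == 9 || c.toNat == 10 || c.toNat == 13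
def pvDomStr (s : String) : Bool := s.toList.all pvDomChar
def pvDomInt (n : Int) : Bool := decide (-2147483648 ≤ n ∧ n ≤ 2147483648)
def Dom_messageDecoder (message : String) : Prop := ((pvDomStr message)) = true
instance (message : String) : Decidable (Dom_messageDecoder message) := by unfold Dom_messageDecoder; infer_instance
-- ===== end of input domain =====

-- B replaces A's fused stateful build-and-bail loop by two separate passes
-- (a validity scan with a boolean flag, then a filtering join); objective: simpler.

-- ===== PORT A =====
-- A's loop with early return, as structural recursion over the reversed chars;
-- message[::-1] is ported as List.reverse (exact for step -1 over the whole string).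
def messageDecoderLoopA : List Char → List Char → Int → String
  | [], acc, _ => String.ofList acc
  | c :: rest, acc, count =>
    if PySem.Chars.isalpha c then messageDecoderLoopA rest (acc ++ [c]) (count + 1)
    else if c == ' ' then messageDecoderLoopA rest (acc ++ [' ']) count
    else if count == 0 then "No message"
    else messageDecoderLoopA rest acc count

def messageDecoder (message : String) : String :=
  messageDecoderLoopA message.toList.reverse [] 0

-- ===== PORT B =====
-- validity pass: seen_letter flag; false result = bail with 'No message'
def messageDecoderValidB : List Char → Bool → Bool
  | [], _ => true
  | c :: rest, seen =>
    if PySem.Chars.isalpha c then messageDecoderValidB rest true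
    else if c != ' ' && !seen then false
    else messageDecoderValidB rest seen

def messageDecoder_alt (message : String) : String :=
  let rev := message.toList.reverse
  if messageDecoderValidB rev false then
    String.ofList (rev.filter (fun c => PySem.Chars.isalpha c || c == ' '))
  else "No message"

-- ===== PRECONDITION & SPEC =====
def Spec_messageDecoder (message : String) (out : String) : Prop := out = messageDecoder_alt message
instance (message : String) (out : String) : Decidable (Spec_messageDecoder message out) := by unfold Spec_messageDecoder; infer_instance

-- ===== CLAIM (what is proved, stated in full; the proofs are below) =====
def Claim_equal_messageDecoder : Prop := ∀ (message : String), Dom_messageDecoder message → Spec_messageDecoder message (messageDecoder message)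

-- ===== LEMMAS AND PROOFS =====
-- Invariant: with count ↔ seen matched (count = 0 ↔ seen = false), A's fused loop
-- equals B's validity check followed by the filter.
theorem loopA_eq (cs : List Char) : ∀ (acc : List Char) (count : Int) (seen : Bool),
    0 ≤ count → (count = 0 ↔ seen = false) →
    messageDecoderLoopA cs acc count =
      (if messageDecoderValidB cs seen then
        String.ofList (acc ++ cs.filter (fun c => PySem.Chars.isalpha c || c == ' '))
      else "No message") := by
  induction cs with
  | nil => intro acc count seen _ _; simp [messageDecoderLoopA, messageDecoderValidB]
  | cons c rest ih =>
    intro acc count seen hnn h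
    by_cases ha : PySem.Chars.isalpha c = true
    · rw [show messageDecoderLoopA (c :: rest) acc count
          = messageDecoderLoopA rest (acc ++ [c]) (count + 1) by
          simp [messageDecoderLoopA, ha]]
      rw [ih (acc ++ [c]) (count + 1) true (by omega) (by simp; omega)]
      simp [messageDecoderValidB, ha]
    · by_cases hsp : c = ' '
      · subst hsp
        rw [show messageDecoderLoopA (' ' :: rest) acc count
            = messageDecoderLoopA rest (acc ++ [' ']) count by
            simp [messageDecoderLoopA, ha]]
        rw [ih (acc ++ [' ']) count seen hnn h]
        simp [messageDecoderValidB, ha]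
      · by_cases hz : count = 0
        · have hseen : seen = false := h.mp hz
          rw [show messageDecoderLoopA (c :: rest) acc count = "No message" by
            simp [messageDecoderLoopA, ha, hsp, hz]]
          have : messageDecoderValidB (c :: rest) seen = false := by
            simp [messageDecoderValidB, ha, hsp, hseen]
          simp [this]
        · have hseen : seen = true := by
            cases seen
            · exact absurd (h.mpr rfl) hz
            · rfl
          rw [show messageDecoderLoopA (c :: rest) acc count
              = messageDecoderLoopA rest acc count by
              simp [messageDecoderLoopA, ha, hsp, hz]]
          rw [ih acc count seen hnn h]
          have : messageDecoderValidB (c :: rest) seen = messageDecoderValidB rest seen := by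
            simp [messageDecoderValidB, ha, hseen]
          simp [this, ha, hsp]

-- ===== VERDICT (by name: the statement is the Claim_ definition above) =====
theorem messageDecoder_spec : Claim_equal_messageDecoder := by
  intro message _
  unfold Spec_messageDecoder messageDecoder messageDecoder_alt
  rw [loopA_eq message.toList.reverse [] 0 false (by simp) (by simp)]
  simp
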